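-- pv_equiv track=rewrite | github.com/pintti/cybsec_repo | Encryption/elgamal_backpack.py | encrypt_backpack
-- ===== SOURCE A (Python) =====
-- from string import ascii_lowercase, ascii_uppercase
--
-- def encrypt_backpack(super_queue: list[int], mod: int, ab: int, string: str):
--     encrypt_list = []
--     public_queue = super_queue #get_public_queue(super_queue, ab, mod)
--     string_list = get_string_list(string)
--     for string in string_list:
--         enc_num = 0
--         for i, num in enumerate(string):
--             if num == "1":
--                 enc_num += public_queue[i]
--         encrypt_list.append(enc_num)
--     return encrypt_list
--
-- def get_string_list(string: str):
--     string_list = []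
--     for letter in string:
--         binary = bin(ascii_lowercase.index(letter)).removeprefix("0b")
--         if len(binary) < 5:
--             binary = ("0" * (5 - len(binary))) + binary
--         string_list.append(binary)
--     return string_list
-- ===== SOURCE B (Python) =====
-- from string import ascii_lowercase
--
-- def encrypt_backpack(super_queue: list[int], mod: int, ab: int, string: str):
--     result = []
--     for letter in string:
--         v = ascii_lowercase.index(letter)
--         enc = 0
--         pos = 4
--         while v:
--             v, bit = divmod(v, 2)
--             if bit:
--                 enc += super_queue[pos]
--             pos -= 1
--         result.append(enc)
--     return result
-- ===== Notes on version B (the rewrite author's own statement) =====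
-- stated objective: simpler
-- what changed: B drops the zero-padded binary-string intermediate entirely: instead of building '0'/'1' strings and scanning them with enumerate, it peels bits off the letter's index with divmod(v,2), walking the public queue back-to-front and stopping at the leading bit.
import Mathlib
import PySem

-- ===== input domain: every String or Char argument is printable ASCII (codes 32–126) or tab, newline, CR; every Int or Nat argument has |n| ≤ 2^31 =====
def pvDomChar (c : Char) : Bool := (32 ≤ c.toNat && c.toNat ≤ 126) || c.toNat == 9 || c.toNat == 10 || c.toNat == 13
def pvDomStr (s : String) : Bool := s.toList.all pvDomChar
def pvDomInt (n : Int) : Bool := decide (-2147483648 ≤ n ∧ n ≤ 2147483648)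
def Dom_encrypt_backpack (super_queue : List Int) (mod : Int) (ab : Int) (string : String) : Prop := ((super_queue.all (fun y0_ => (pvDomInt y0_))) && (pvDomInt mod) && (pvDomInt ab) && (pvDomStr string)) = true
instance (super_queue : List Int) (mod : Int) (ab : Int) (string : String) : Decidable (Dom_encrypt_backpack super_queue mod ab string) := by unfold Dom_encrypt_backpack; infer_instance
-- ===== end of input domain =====

-- B replaces A's zero-padded binary-string intermediate (build '0'/'1' strings, then scan them with
-- enumerate) by direct arithmetic: repeated divmod by 2 walks the public queue back-to-front and stops
-- at the leading bit; objective: simpler (no string built or scanned per letter; not claimed faster).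

-- string.ascii_lowercase
def lowerChars : List Char := "abcdefghijklmnopqrstuvwxyz".toList

-- ascii_lowercase.index(letter); .getD 0 is total cover for the ValueError case, excluded by Pre_
def lowerIdx (c : Char) : Nat := (PySem.List.index? lowerChars c).getD 0

-- ===== PORT A =====
-- body of get_string_list's loop: bin(v).removeprefix("0b") (v ≥ 0 here, so = PySem.Int.toBinChars), then zero-pad to 5
def binPadA (v : Nat) : List Char :=
  let binary := PySem.Int.toBinChars (v : Int)
  if binary.length < 5 then List.replicate (5 - binary.length) '0' ++ binary else binary

-- inner loop of encrypt_backpack: for i, num in enumerate(string): if num == "1": enc_num += public_queue[i]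
-- (.getD 0 is total cover for the IndexError case, excluded by Pre_)
def encCharA (public_queue : List Int) (s : List Char) : Int :=
  (PySem.List.enumerate s).foldl
    (fun enc_num p => if p.2 = '1' then enc_num + (PySem.List.pyGet? public_queue p.1).getD 0 else enc_num) 0

def encrypt_backpack (super_queue : List Int) (mod : Int) (ab : Int) (string : String) : List Int :=
  let public_queue := super_queue
  let string_list := string.toList.map (fun letter => binPadA (lowerIdx letter))
  string_list.map (fun s => encCharA public_queue s)

-- ===== PORT B =====
-- Source B's while loop: while v: v, bit = divmod(v, 2); if bit: enc += super_queue[pos]; pos -= 1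
def encCharB (super_queue : List Int) (v : Nat) (pos : Int) (enc : Int) : Int :=
  if v = 0 then enc
  else encCharB super_queue (v / 2) (pos - 1)
         (if v % 2 = 1 then enc + (PySem.List.pyGet? super_queue pos).getD 0 else enc)
  termination_by v
  decreasing_by exact Nat.div_lt_self (Nat.pos_of_ne_zero (by assumption)) (by omega)

def encrypt_backpack_alt (super_queue : List Int) (mod : Int) (ab : Int) (string : String) : List Int :=
  string.toList.map (fun letter => encCharB super_queue (lowerIdx letter) 4 0)

-- ===== PRECONDITION & SPEC =====
-- Pre_ excludes exactly the inputs on which Python A raises: a character outside ascii_lowercase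
-- (ValueError from .index) or a set bit whose position reaches past the end of super_queue (IndexError).
def Pre_encrypt_backpack (super_queue : List Int) (mod : Int) (ab : Int) (string : String) : Prop :=
  (string.toList.all (fun c => 97 ≤ c.toNat && c.toNat ≤ 122 &&
    (List.range 5).all (fun i =>
      !(((c.toNat - 97) >>> (4 - i)) % 2 == 1) || decide (i < super_queue.length)))) = true
instance (super_queue : List Int) (mod : Int) (ab : Int) (string : String) : Decidable (Pre_encrypt_backpack super_queue mod ab string) := by unfold Pre_encrypt_backpack; infer_instance

def pvWitness_encrypt_backpack : List Int × Int × Int × String := ([3, 5, 9, 17, 33], 7, 2, "ab")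

def Spec_encrypt_backpack (super_queue : List Int) (mod : Int) (ab : Int) (string : String) (out : List Int) : Prop := out = encrypt_backpack_alt super_queue mod ab string
instance (super_queue : List Int) (mod : Int) (ab : Int) (string : String) (out : List Int) : Decidable (Spec_encrypt_backpack super_queue mod ab string out) := by unfold Spec_encrypt_backpack; infer_instance

-- ===== CLAIM (what is proved, stated in full; the proofs are below) =====
def Claim_equal_encrypt_backpack : Prop := ∀ (super_queue : List Int) (mod : Int) (ab : Int) (string : String), Dom_encrypt_backpack super_queue mod ab string → Pre_encrypt_backpack super_queue mod ab string → Spec_encrypt_backpack super_queue mod ab string (encrypt_backpack super_queue mod ab string)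

-- ===== LEMMAS AND PROOFS =====

theorem lowerIdx_lt (c : Char) : lowerIdx c < 26 := by
  unfold lowerIdx
  cases h : PySem.List.index? lowerChars c with
  | none => simp
  | some k =>
      obtain ⟨hk, -, -⟩ := PySem.List.getElem_of_index?_eq_some h
      simpa using hk

theorem char_eq (q : List Int) (v : Nat) (hv : v < 26) :
    encCharA q (binPadA v) = encCharB q v 4 0 := by
  interval_cases v <;>
    simp [encCharA, binPadA, encCharB, PySem.Int.toBinChars, Nat.toDigits, Nat.toDigitsCore,
          Nat.digitChar, PySem.List.enumerate, PySem.List.enumerate_cons] <;> omega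

-- ===== VERDICT (by name: the statement is the Claim_ definition above) =====
theorem encrypt_backpack_spec : Claim_equal_encrypt_backpack := by
  intro q m ab s _ _
  unfold Spec_encrypt_backpack encrypt_backpack encrypt_backpack_alt
  simp only [List.map_map]
  exact List.map_congr_left (fun c _ => char_eq q (lowerIdx c) (lowerIdx_lt c))
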